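-- pv_equiv track=rewrite | github.com/johnwesleyharding/Sprint-Challenge--Hash | hashtables/ex5/ex5.py | finder
-- ===== SOURCE A (Python) =====
-- def finder(files, queries):
--
--     ht = {}
--     result = []
--
--     for file in files:
--
--         tail = file.split('/')[-1]
--
--         if tail in ht:
--
--             ht[tail].append(file)
--
--         else:
--
--             ht[tail] = [file]
--
--     for query in queries:
--
--         if query in ht:
--
--             result += ht[query]
--
--     return result
-- ===== SOURCE B (Python) =====
-- def finder(files, queries):
--     result = []
--     for query in queries:
--         for file in files:
--             if file.split('/')[-1] == query:
--                 result.append(file)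
--     return result
-- ===== Notes on version B (the rewrite author's own statement) =====
-- stated objective: simpler
-- what changed: Drops the hash table: a plain nested scan appends, for each query in order, every file whose basename equals it.
import Mathlib
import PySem

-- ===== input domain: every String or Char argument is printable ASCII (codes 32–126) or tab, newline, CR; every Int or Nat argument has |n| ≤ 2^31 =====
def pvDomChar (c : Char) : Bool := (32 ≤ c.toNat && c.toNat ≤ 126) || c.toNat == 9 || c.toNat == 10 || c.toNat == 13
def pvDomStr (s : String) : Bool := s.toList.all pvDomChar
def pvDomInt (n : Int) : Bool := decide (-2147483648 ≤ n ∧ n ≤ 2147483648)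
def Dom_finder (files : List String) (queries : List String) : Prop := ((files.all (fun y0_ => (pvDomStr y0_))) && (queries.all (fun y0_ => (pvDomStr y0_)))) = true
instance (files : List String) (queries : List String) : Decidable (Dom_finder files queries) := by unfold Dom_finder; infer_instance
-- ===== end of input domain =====

-- B replaces A's basename-indexed hash table with a plain nested scan over queries then files: simpler, same return value.

-- file.split('/')[-1]; split? with the nonempty separator "/" always returns some nonempty list,
-- so the .getD fallbacks are unreachable and this is exact
def pyTail (f : String) : String :=
  (PySem.List.pyGet? ((PySem.Str.split? f "/").getD []) (-1)).getD ""

-- ===== PORT A =====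
def finder (files : List String) (queries : List String) : List String :=
  let ht := files.foldl (fun ht file =>
      if ht.contains (pyTail file) then ht.modify (pyTail file) [] (· ++ [file])  -- ht[tail].append(file)
      else ht.insert (pyTail file) [file])                                        -- ht[tail] = [file]
    (PySem.Dict.empty (κ := String) (ν := List String))
  queries.foldl (fun result query =>
      if ht.contains query then result ++ ht.getD query [] else result) []

-- ===== PORT B =====
def finder_alt (files : List String) (queries : List String) : List String :=
  queries.foldl (fun result query =>
    files.foldl (fun result file =>
      if pyTail file == query then result ++ [file] else result) result) []

-- ===== PRECONDITION & SPEC =====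
def Spec_finder (files : List String) (queries : List String) (out : List String) : Prop := out = finder_alt files queries
instance (files : List String) (queries : List String) (out : List String) : Decidable (Spec_finder files queries out) := by unfold Spec_finder; infer_instance

-- ===== CLAIM (what is proved, stated in full; the proofs are below) =====
def Claim_equal_finder : Prop := ∀ (files : List String) (queries : List String), Dom_finder files queries → Spec_finder files queries (finder files queries)

-- ===== LEMMAS AND PROOFS =====

-- the hash table A's first loop builds
def buildHt (files : List String) : PySem.Dict String (List String) :=
  files.foldl (fun ht file =>
      if ht.contains (pyTail file) then ht.modify (pyTail file) [] (· ++ [file])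
      else ht.insert (pyTail file) [file])
    (PySem.Dict.empty (κ := String) (ν := List String))

theorem build_getD (files : List String) (d : PySem.Dict String (List String)) (q : String) :
    (files.foldl (fun ht file =>
        if ht.contains (pyTail file) then ht.modify (pyTail file) [] (· ++ [file])
        else ht.insert (pyTail file) [file]) d).getD q []
      = d.getD q [] ++ files.filter (fun f => pyTail f == q) := by
  induction files generalizing d with
  | nil => simp
  | cons f fs ih =>
    simp only [List.foldl_cons, List.filter_cons, ih]
    by_cases hc : d.contains (pyTail f)
    · simp only [hc, if_true]
      by_cases hq : pyTail f = q
      · simp [hq]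
      · have hq' : q ≠ pyTail f := fun h => hq h.symm
        simp [hq, hq', PySem.Dict.getD_modify]
    · simp only [hc, Bool.false_eq_true, if_false]
      by_cases hq : pyTail f = q
      · subst hq
        have h0 : d.getD (pyTail f) [] = [] :=
          PySem.Dict.getD_of_not_contains d [] (by simpa using hc)
        simp [h0]
      · have hq' : q ≠ pyTail f := fun h => hq h.symm
        simp [hq, hq', PySem.Dict.getD_insert]

theorem build_contains (files : List String) (d : PySem.Dict String (List String)) (q : String) :
    (files.foldl (fun ht file =>
        if ht.contains (pyTail file) then ht.modify (pyTail file) [] (· ++ [file])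
        else ht.insert (pyTail file) [file]) d).contains q
      = (d.contains q || files.any (fun f => pyTail f == q)) := by
  induction files generalizing d with
  | nil => simp
  | cons f fs ih =>
    simp only [List.foldl_cons, List.any_cons, ih]
    have step : ∀ d' : PySem.Dict String (List String),
        d'.contains q = (q == pyTail f || d.contains q) →
        (d'.contains q || fs.any (fun f => pyTail f == q))
          = (d.contains q || (pyTail f == q || fs.any (fun f => pyTail f == q))) := by
      intro d' hd
      by_cases hq : q = pyTail f
      · subst hq; simp [hd]
      · have h1 : (q == pyTail f) = false := beq_eq_false_iff_ne.mpr hq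
        have h2 : (pyTail f == q) = false := beq_eq_false_iff_ne.mpr (fun h => hq h.symm)
        simp [hd, h1, h2]
    by_cases hc : d.contains (pyTail f)
    · simp only [hc, if_true]
      exact step _ (by simp [PySem.Dict.contains_modify])
    · simp only [hc, Bool.false_eq_true, if_false]
      exact step _ (by simp [PySem.Dict.contains_insert])

-- one step of A's query loop equals one step of B's (looked-up bucket = linear scan)
theorem step_eq (files : List String) (acc : List String) (q : String) :
    (if (buildHt files).contains q then acc ++ (buildHt files).getD q [] else acc)
      = files.foldl (fun r f => if pyTail f == q then r ++ [f] else r) acc := by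
  rw [PySem.List.foldl_append_if_eq_filter]
  have hc : (buildHt files).contains q = files.any (fun f => pyTail f == q) := by
    simpa [buildHt] using build_contains files PySem.Dict.empty q
  have hg : (buildHt files).getD q [] = files.filter (fun f => pyTail f == q) := by
    simpa [buildHt] using build_getD files PySem.Dict.empty q
  rw [hc, hg]
  by_cases h : files.any (fun f => pyTail f == q)
  · simp [h]
  · have : files.filter (fun f => pyTail f == q) = [] := by
      simp only [List.any_eq_true, not_exists] at h
      exact List.filter_eq_nil_iff.mpr (by intro x hx; simp_all)
    simp [h, this]

theorem loops_eq (files : List String) (qs acc : List String) :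
    qs.foldl (fun r q => if (buildHt files).contains q then r ++ (buildHt files).getD q [] else r) acc
      = qs.foldl (fun r q =>
          files.foldl (fun r f => if pyTail f == q then r ++ [f] else r) r) acc := by
  induction qs generalizing acc with
  | nil => rfl
  | cons q qs ih => rw [List.foldl_cons, List.foldl_cons, step_eq]; exact ih _

-- ===== VERDICT (by name: the statement is the Claim_ definition above) =====
theorem finder_spec : Claim_equal_finder := by
  intro files queries _
  show finder files queries = finder_alt files queries
  show List.foldl (fun r q => if (buildHt files).contains q then r ++ (buildHt files).getD q [] else r) [] queries
        = finder_alt files queries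
  exact loops_eq files queries []
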